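-- pv_equiv track=rewrite | github.com/peaciu29ernb/logslice | logslice/truncate.py | truncate_fields
-- ===== SOURCE A (Python) =====
-- DEFAULT_SUFFIX = "..."
--
-- def truncate_value(value: str, max_length: int, suffix: str = DEFAULT_SUFFIX) -> str:
--     """Truncate a string value to max_length, appending suffix if truncated."""
--     if not isinstance(value, str):
--         return value
--     if len(value) <= max_length:
--         return value
--     cut = max(0, max_length - len(suffix))
--     return value[:cut] + suffix
--
-- def truncate_fields(
--     record: dict,
--     fields: list[str] | None,
--     max_length: int,
--     suffix: str = DEFAULT_SUFFIX,
-- ) -> dict: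
--     """Return a new record with specified fields (or all string fields) truncated.
--
--     The ``_raw`` key is always preserved unchanged.
--     """
--     result = dict(record)
--     for key, value in record.items():
--         if key == "_raw":
--             continue
--         if fields is not None and key not in fields:
--             continue
--         if isinstance(value, str):
--             result[key] = truncate_value(value, max_length, suffix)
--     return result
-- ===== SOURCE B (Python) =====
-- DEFAULT_SUFFIX = "..."
--
-- def truncate_value(value: str, max_length: int, suffix: str = DEFAULT_SUFFIX) -> str:
--     if not isinstance(value, str):
--         return value
--     if len(value) <= max_length:
--         return value
--     cut = max(0, max_length - len(suffix))
--     return value[:cut] + suffix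
--
-- def truncate_fields(record, fields, max_length, suffix=DEFAULT_SUFFIX):
--     result = dict(record)
--     if fields is None:
--         for key, value in record.items():
--             if key != "_raw" and isinstance(value, str):
--                 result[key] = truncate_value(value, max_length, suffix)
--     else:
--         for key in fields:
--             if key != "_raw" and key in record and isinstance(record[key], str):
--                 result[key] = truncate_value(record[key], max_length, suffix)
--     return result
-- ===== Notes on version B (the rewrite author's own statement) =====
-- stated objective: alternative
-- what changed: When fields is given, B loops over the fields list with direct dict lookups (starting from a copy of the record) instead of scanning every record item and membership-testing each key against fields; only the fields-is-None case still scans the record.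
import Mathlib
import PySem

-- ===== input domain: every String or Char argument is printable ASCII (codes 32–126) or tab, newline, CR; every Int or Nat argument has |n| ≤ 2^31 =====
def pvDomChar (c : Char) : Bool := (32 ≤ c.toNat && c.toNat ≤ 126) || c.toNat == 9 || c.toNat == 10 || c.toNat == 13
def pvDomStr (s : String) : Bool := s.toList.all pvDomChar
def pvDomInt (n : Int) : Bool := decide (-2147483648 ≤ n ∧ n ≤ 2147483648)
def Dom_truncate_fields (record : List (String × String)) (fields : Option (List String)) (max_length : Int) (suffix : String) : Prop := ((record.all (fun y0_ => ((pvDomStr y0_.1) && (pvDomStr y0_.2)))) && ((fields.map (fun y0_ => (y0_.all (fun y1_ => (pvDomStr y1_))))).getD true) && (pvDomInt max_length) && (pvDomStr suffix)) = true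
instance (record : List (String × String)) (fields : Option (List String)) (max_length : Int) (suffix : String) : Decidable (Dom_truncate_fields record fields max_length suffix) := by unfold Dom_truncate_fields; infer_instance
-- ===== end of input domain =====

-- B changes the decomposition: when `fields` is given it loops over `fields` with direct dict
-- lookups instead of scanning every record key and membership-testing it against `fields`.

-- ===== PORT A =====
-- helper shared by both Python files: truncate_value (isinstance check is vacuous: values are str)
def truncate_value_port (value : String) (max_length : Int) (suffix : String) : String :=
  if PySem.Str.len value ≤ max_length then value
  else
    let cut : Int := max 0 (max_length - PySem.Str.len suffix)
    String.ofList (PySem.List.slice value.toList none (some cut) ++ suffix.toList)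

def truncate_fields (record : List (String × String)) (fields : Option (List String)) (max_length : Int) (suffix : String) : List (String × String) :=
  -- `record` is a Python dict: its items are those of PySem.Dict.ofList record (last value wins)
  let d0 : PySem.Dict String String := PySem.Dict.ofList record
  let result := d0.items.foldl (fun res kv =>
    if kv.1 == "_raw" then res
    else if (match fields with | none => false | some fs => !(fs.contains kv.1)) then res
    else res.insert kv.1 (truncate_value_port kv.2 max_length suffix)) d0
  result.items

-- ===== PORT B =====
def truncate_fields_alt (record : List (String × String)) (fields : Option (List String)) (max_length : Int) (suffix : String) : List (String × String) :=
  let d0 : PySem.Dict String String := PySem.Dict.ofList record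
  match fields with
  | none =>
    (d0.items.foldl (fun res kv =>
      if kv.1 == "_raw" then res
      else res.insert kv.1 (truncate_value_port kv.2 max_length suffix)) d0).items
  | some fs =>
    (fs.foldl (fun res k =>
      if k == "_raw" then res
      else match d0.get? k with
        | some v => res.insert k (truncate_value_port v max_length suffix)
        | none => res) d0).items

-- ===== PRECONDITION & SPEC =====
def Spec_truncate_fields (record : List (String × String)) (fields : Option (List String)) (max_length : Int) (suffix : String) (out : List (String × String)) : Prop := out = truncate_fields_alt record fields max_length suffix
instance (record : List (String × String)) (fields : Option (List String)) (max_length : Int) (suffix : String) (out : List (String × String)) : Decidable (Spec_truncate_fields record fields max_length suffix out) := by unfold Spec_truncate_fields; infer_instance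

-- ===== CLAIM (what is proved, stated in full; the proofs are below) =====
def Claim_equal_truncate_fields : Prop := ∀ (record : List (String × String)) (fields : Option (List String)) (max_length : Int) (suffix : String), Dom_truncate_fields record fields max_length suffix → Spec_truncate_fields record fields max_length suffix (truncate_fields record fields max_length suffix)

-- ===== LEMMAS AND PROOFS =====

-- A's loop over the record items, characterised by lookups (fields = some fs case).
theorem tf_foldA (fs : List String) (mx : Int) (sf : String) :
    ∀ (l : List (String × String)) (res : PySem.Dict String String),
    (l.map Prod.fst).Nodup →
    (∀ p ∈ l, res.contains p.1 = true) →
    ((l.foldl (fun res kv =>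
        if kv.1 == "_raw" then res
        else if !(fs.contains kv.1) then res
        else res.insert kv.1 (truncate_value_port kv.2 mx sf)) res).keys = res.keys ∧
     (∀ k, k ∉ l.map Prod.fst →
        (l.foldl (fun res kv =>
          if kv.1 == "_raw" then res
          else if !(fs.contains kv.1) then res
          else res.insert kv.1 (truncate_value_port kv.2 mx sf)) res).get? k = res.get? k) ∧
     (∀ k v, (k, v) ∈ l →
        (l.foldl (fun res kv =>
          if kv.1 == "_raw" then res
          else if !(fs.contains kv.1) then res
          else res.insert kv.1 (truncate_value_port kv.2 mx sf)) res).get? k =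
          if k ≠ "_raw" ∧ fs.contains k = true then some (truncate_value_port v mx sf)
          else res.get? k)) := by
  intro l
  induction l with
  | nil =>
    intro res _ _
    exact ⟨rfl, fun k _ => rfl, fun k v h => by simp at h⟩
  | cons p tl ih =>
    intro res hnd hsub
    obtain ⟨k0, v0⟩ := p
    have hc0 : res.contains k0 = true := hsub (k0, v0) (List.mem_cons_self ..)
    have hnd' : (tl.map Prod.fst).Nodup := (List.nodup_cons.mp hnd).2
    have hk0nt : k0 ∉ tl.map Prod.fst := (List.nodup_cons.mp hnd).1
    set res' : PySem.Dict String String :=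
      (if k0 == "_raw" then res
       else if !(fs.contains k0) then res
       else res.insert k0 (truncate_value_port v0 mx sf)) with hres'
    have hkeys' : res'.keys = res.keys := by
      rw [hres']; split_ifs with h1 h2
      · rfl
      · rfl
      · exact PySem.Dict.keys_insert_of_contains _ _ hc0
    have hcont' : ∀ p ∈ tl, res'.contains p.1 = true := by
      intro p hp
      rw [PySem.Dict.contains_iff_mem_keys, hkeys', ← PySem.Dict.contains_iff_mem_keys]
      exact hsub p (List.mem_cons_of_mem _ hp)
    have hget'_ne : ∀ k, k ≠ k0 → res'.get? k = res.get? k := by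
      intro k hk
      rw [hres']; split_ifs with h1 h2
      · rfl
      · rfl
      · exact PySem.Dict.get?_insert_of_ne _ _ hk
    have hget'_k0 : res'.get? k0 =
        (if k0 ≠ "_raw" ∧ fs.contains k0 = true then some (truncate_value_port v0 mx sf)
         else res.get? k0) := by
      rw [hres']
      by_cases h1 : (k0 == "_raw") = true
      · have h1' : ¬ (k0 ≠ "_raw" ∧ fs.contains k0 = true) := fun h => h.1 (by simpa using h1)
        rw [if_pos h1, if_neg h1']
      · by_cases h2 : fs.contains k0 = true
        · have hcond : k0 ≠ "_raw" ∧ fs.contains k0 = true := ⟨by simpa using h1, h2⟩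
          rw [if_neg h1, if_neg (by rw [h2]; simp : ¬ ((!fs.contains k0) = true)), if_pos hcond]
          exact PySem.Dict.get?_insert_self _ _ _
        · have hcond : ¬ (k0 ≠ "_raw" ∧ fs.contains k0 = true) := fun h => h2 h.2
          have hb : (!fs.contains k0) = true := by
            rcases Bool.eq_false_or_eq_true (fs.contains k0) with h | h
            · exact absurd h h2
            · rw [h]; rfl
          rw [if_neg h1, if_pos hb, if_neg hcond]
    obtain ⟨iha, ihb, ihc⟩ := ih res' hnd' hcont'
    simp only [List.foldl_cons]
    refine ⟨by rw [iha, hkeys'], ?_, ?_⟩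
    · intro k hk
      have hk0 : k ≠ k0 := by
        intro h; exact hk (by simp [h])
      have hkt : k ∉ tl.map Prod.fst := fun h => hk (by simp [h])
      rw [ihb k hkt, hget'_ne k hk0]
    · intro k v hkv
      rcases List.mem_cons.mp hkv with h | h
      · have hk : k = k0 := (Prod.ext_iff.mp h).1
        have hv : v = v0 := (Prod.ext_iff.mp h).2
        subst hk; subst hv
        rw [ihb k hk0nt, hget'_k0]
      · have hkk0 : k ≠ k0 := by
          intro he; apply hk0nt; rw [← he]
          exact List.mem_map_of_mem h
        rw [ihc k v h]
        by_cases hcnd : k ≠ "_raw" ∧ fs.contains k = true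
        · rw [if_pos hcnd, if_pos hcnd]
        · rw [if_neg hcnd, if_neg hcnd]
          exact hget'_ne k hkk0

-- B's loop over the fields list, characterised by lookups.
theorem tf_foldB (d0 : PySem.Dict String String) (mx : Int) (sf : String) :
    ∀ (ks : List String) (res : PySem.Dict String String),
    res.keys = d0.keys →
    ((ks.foldl (fun res k =>
        if k == "_raw" then res
        else match d0.get? k with
          | some v => res.insert k (truncate_value_port v mx sf)
          | none => res) res).keys = d0.keys ∧
     (∀ k, (ks.foldl (fun res k =>
        if k == "_raw" then res
        else match d0.get? k with
          | some v => res.insert k (truncate_value_port v mx sf)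
          | none => res) res).get? k =
        if k ≠ "_raw" ∧ k ∈ ks ∧ (d0.get? k).isSome then (d0.get? k).map (fun v => truncate_value_port v mx sf)
        else res.get? k)) := by
  intro ks
  induction ks with
  | nil =>
    intro res hkeys
    exact ⟨hkeys, fun k => by simp⟩
  | cons k0 tl ih =>
    intro res hkeys
    set res' : PySem.Dict String String :=
      (if k0 == "_raw" then res
       else match d0.get? k0 with
         | some v => res.insert k0 (truncate_value_port v mx sf)
         | none => res) with hres'
    have hkeys' : res'.keys = d0.keys := by
      rw [hres']; split_ifs with h1
      · exact hkeys
      · cases hg : d0.get? k0 with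
        | none => exact hkeys
        | some v =>
          have hmem : k0 ∈ d0.keys := by
            by_contra hnm
            rw [(PySem.Dict.get?_eq_none_iff_not_mem_keys _ _).mpr hnm] at hg
            simp at hg
          have hc : res.contains k0 = true := by
            rw [PySem.Dict.contains_iff_mem_keys, hkeys]; exact hmem
          rw [PySem.Dict.keys_insert_of_contains _ _ hc]; exact hkeys
    have hget'_ne : ∀ k, k ≠ k0 → res'.get? k = res.get? k := by
      intro k hk
      rw [hres']; split_ifs with h1
      · rfl
      · cases hg : d0.get? k0 with
        | none => rfl
        | some v => exact PySem.Dict.get?_insert_of_ne _ _ hk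
    obtain ⟨iha, ihb⟩ := ih res' hkeys'
    simp only [List.foldl_cons]
    refine ⟨iha, ?_⟩
    intro k
    rw [ihb k]
    by_cases htl : k ≠ "_raw" ∧ k ∈ tl ∧ (d0.get? k).isSome
    · rw [if_pos htl, if_pos ⟨htl.1, List.mem_cons_of_mem _ htl.2.1, htl.2.2⟩]
    · rw [if_neg htl]
      by_cases hall : k ≠ "_raw" ∧ k ∈ k0 :: tl ∧ (d0.get? k).isSome
      · rw [if_pos hall]
        have hkk0 : k = k0 := by
          rcases List.mem_cons.mp hall.2.1 with h | h
          · exact h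
          · exact absurd ⟨hall.1, h, hall.2.2⟩ htl
        subst hkk0
        cases hg : d0.get? k with
        | none => rw [hg] at hall; simp at hall
        | some v =>
          rw [hres', if_neg (by simpa using hall.1), hg]
          simp [PySem.Dict.get?_insert_self]
      · rw [if_neg hall]
        by_cases hkk0 : k = k0
        · subst hkk0
          rw [hres']; split_ifs with h1
          · rfl
          · cases hg : d0.get? k with
            | none => rfl
            | some v =>
              exact absurd ⟨by simpa using h1, List.mem_cons_self .., by rw [hg]; rfl⟩ hall
        · exact hget'_ne k hkk0

-- ===== VERDICT (by name: the statement is the Claim_ definition above) =====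
theorem truncate_fields_spec : Claim_equal_truncate_fields := by
  intro record fields mx sf _
  unfold Spec_truncate_fields
  cases fields with
  | none => simp [truncate_fields, truncate_fields_alt]
  | some fs =>
    simp only [truncate_fields, truncate_fields_alt]
    set d0 : PySem.Dict String String := PySem.Dict.ofList record with hd0
    have hnd : d0.keys.Nodup := PySem.Dict.nodup_keys_ofList record
    have hkeys_eq : d0.items.map Prod.fst = d0.keys := rfl
    have hndi : (d0.items.map Prod.fst).Nodup := by rw [hkeys_eq]; exact hnd
    have hsub : ∀ p ∈ d0.items, d0.contains p.1 = true := fun p hp =>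
      (PySem.Dict.contains_iff_mem_keys _ _).mpr (PySem.Dict.mem_keys_of_mem_items _ hp)
    obtain ⟨hAkeys, hAout, hAin⟩ := tf_foldA fs mx sf d0.items d0 hndi hsub
    obtain ⟨hBkeys, hBget⟩ := tf_foldB d0 mx sf fs d0 rfl
    set RA := d0.items.foldl (fun res kv =>
        if kv.1 == "_raw" then res
        else if !(fs.contains kv.1) then res
        else res.insert kv.1 (truncate_value_port kv.2 mx sf)) d0 with hRA
    set RB := fs.foldl (fun res k =>
        if k == "_raw" then res
        else match d0.get? k with
          | some v => res.insert k (truncate_value_port v mx sf)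
          | none => res) d0 with hRB
    have hget : ∀ k, RA.get? k = RB.get? k := by
      intro k
      by_cases hmem : k ∈ d0.keys
      · have hg : ∃ v, d0.get? k = some v := by
          cases hg : d0.get? k with
          | none => exact absurd ((PySem.Dict.get?_eq_none_iff_not_mem_keys _ _).mp hg) (by simpa using hmem)
          | some v => exact ⟨v, rfl⟩
        obtain ⟨v, hv⟩ := hg
        have hitems : (k, v) ∈ d0.items := PySem.Dict.mem_items_of_get?_eq_some _ hv
        rw [hAin k v hitems, hBget k]
        by_cases hcnd : k ≠ "_raw" ∧ fs.contains k = true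
        · rw [if_pos hcnd, if_pos (⟨hcnd.1, by simpa using hcnd.2, by rw [hv]; rfl⟩ :
            k ≠ "_raw" ∧ k ∈ fs ∧ (d0.get? k).isSome), hv]
          rfl
        · rw [if_neg hcnd, if_neg (fun h => hcnd ⟨h.1, by simpa using h.2.1⟩)]
      · have hnone : d0.get? k = none := (PySem.Dict.get?_eq_none_iff_not_mem_keys _ _).mpr hmem
        rw [hAout k (by rw [hkeys_eq]; exact hmem), hBget k, if_neg (by simp [hnone])]
    have hndA : RA.keys.Nodup := by rw [hAkeys]; exact hnd
    have hndB : RB.keys.Nodup := by rw [hBkeys]; exact hnd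
    rw [PySem.Dict.items_eq_map_keys RA hndA "", PySem.Dict.items_eq_map_keys RB hndB "",
        hAkeys, hBkeys]
    apply List.map_congr_left
    intro k _
    rw [PySem.Dict.getD_eq_get?_getD, PySem.Dict.getD_eq_get?_getD, hget k]
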